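-- pv_equiv track=rewrite | github.com/Tattva-Chronicles/GitaVerse-Open-Corpus | scripts/build_master_verses.py | slugify_author
-- ===== SOURCE A (Python) =====
-- def slugify_author(name: str) -> str:
--     """Turn a raw author name into a simple slug id."""
--     name = name.strip().lower()
--     # remove honorifics that show up often, but keep fairly conservative
--     for prefix in ["srimad ", "shri ", "sri ", "swami ", "acharya ", "ācārya "]:
--         if name.startswith(prefix):
--             name = name[len(prefix):]
--             break
--     # collapse non-alnum to single hyphen
--     out = []
--     last_sep = False
--     for ch in name:
--         if ch.isalnum():
--             out.append(ch)
--             last_sep = False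
--         else:
--             if not last_sep:
--                 out.append("-")
--                 last_sep = True
--     slug = "".join(out).strip("-")
--     return slug or "unknown"
-- ===== SOURCE B (Python) =====
-- def slugify_author(name: str) -> str:
--     """Turn a raw author name into a simple slug id (alphanumeric-run scan)."""
--     name = name.strip().lower()
--     prefixes = ["srimad ", "shri ", "sri ", "swami ", "acharya ", "\u0101c\u0101rya "]
--     name = next((name[len(p):] for p in prefixes if name.startswith(p)), name)
--     runs = []
--     i, n = 0, len(name)
--     while i < n:
--         if name[i].isalnum():
--             j = i + 1
--             while j < n and name[j].isalnum():
--                 j += 1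
--             runs.append(name[i:j])
--             i = j
--         else:
--             i += 1
--     return "-".join(runs) or "unknown"
-- ===== Notes on version B (the rewrite author's own statement) =====
-- stated objective: idiomatic
-- what changed: B drops A's last_sep flag, per-character accumulator and final edge strip: it scans the name for maximal alphanumeric runs with a two-index span scan and joins the runs with single hyphens, so separator collapsing and edge trimming disappear.
import Mathlib
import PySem

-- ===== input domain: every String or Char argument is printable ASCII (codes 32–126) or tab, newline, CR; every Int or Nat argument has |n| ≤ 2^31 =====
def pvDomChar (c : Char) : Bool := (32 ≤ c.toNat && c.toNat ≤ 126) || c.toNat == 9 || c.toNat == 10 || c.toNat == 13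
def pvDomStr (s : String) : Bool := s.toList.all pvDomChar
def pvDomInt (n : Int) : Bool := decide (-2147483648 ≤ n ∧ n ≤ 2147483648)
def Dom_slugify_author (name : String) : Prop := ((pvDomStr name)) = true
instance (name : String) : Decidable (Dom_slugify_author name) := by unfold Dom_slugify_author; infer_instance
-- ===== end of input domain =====

-- B replaces A's last_sep collapse flag by a direct scan of maximal alphanumeric runs joined with '-' (idiomatic; no strip('-') needed).

-- ===== PORT A =====
-- the honorific prefixes (shared constant of both Pythons)
def pvPrefixesA : List (List Char) :=
  ["srimad ", "shri ", "sri ", "swami ", "acharya ", "ācārya "].map String.toList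

-- A's honorific loop: drop the first matching prefix, then break
def pvDropPrefixA : List (List Char) → List Char → List Char
  | [], n => n
  | p :: ps, n => if PySem.Chars.startswith n p then n.drop p.length else pvDropPrefixA ps n

-- A's loop body: (out, last_sep) updated per character
def pvStepA (st : List Char × Bool) (ch : Char) : List Char × Bool :=
  if PySem.Chars.isalnum ch then (st.1 ++ [ch], false)
  else if st.2 then st else (st.1 ++ ['-'], true)

def slugify_author (name : String) : String :=
  let n := PySem.Chars.lower (PySem.Chars.strip name.toList)
  let n := pvDropPrefixA pvPrefixesA n
  let out := (n.foldl pvStepA ([], false)).1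
  let slug := PySem.Chars.stripChars out ['-']
  if slug = [] then "unknown" else String.ofList slug

-- ===== PORT B =====
-- B's run scanner: each maximal alphanumeric run becomes one slug piece
def pvRuns (cs : List Char) : List (List Char) :=
  match cs with
  | [] => []
  | c :: rest =>
    if PySem.Chars.isalnum c then
      (c :: rest.takeWhile PySem.Chars.isalnum) :: pvRuns (rest.dropWhile PySem.Chars.isalnum)
    else pvRuns rest
termination_by cs.length
decreasing_by
  · simpa using Nat.lt_succ_of_le (List.length_dropWhile_le _ rest)
  · simp

def slugify_author_alt (name : String) : String :=
  let n := PySem.Chars.lower (PySem.Chars.strip name.toList)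
  let n := match pvPrefixesA.find? (fun p => PySem.Chars.startswith n p) with
           | some p => n.drop p.length
           | none => n
  let slug := List.intercalate ['-'] (pvRuns n)
  if slug = [] then "unknown" else String.ofList slug

-- ===== PRECONDITION & SPEC =====
def Spec_slugify_author (name : String) (out : String) : Prop := out = slugify_author_alt name
instance (name : String) (out : String) : Decidable (Spec_slugify_author name out) := by unfold Spec_slugify_author; infer_instance

-- ===== CLAIM (what is proved, stated in full; the proofs are below) =====
def Claim_equal_slugify_author : Prop := ∀ (name : String), Dom_slugify_author name → Spec_slugify_author name (slugify_author name)

-- ===== LEMMAS AND PROOFS =====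

-- A's prefix loop is B's find?-based prefix removal
theorem pvDropPrefix_eq (ps : List (List Char)) (n : List Char) :
    pvDropPrefixA ps n =
      match ps.find? (fun p => PySem.Chars.startswith n p) with
      | some p => n.drop p.length
      | none => n := by
  induction ps with
  | nil => rfl
  | cons p ps ih =>
    by_cases h : PySem.Chars.startswith n p
    · simp [pvDropPrefixA, h, List.find?]
    · simp [pvDropPrefixA, h, List.find?, ih]

-- recursive form of A's collapse loop
def pvCol : Bool → List Char → List Char
  | _, [] => []
  | sep, c :: cs =>
    if PySem.Chars.isalnum c then c :: pvCol false cs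
    else if sep then pvCol true cs else '-' :: pvCol true cs

theorem pvFold_eq_col (cs : List Char) : ∀ (acc : List Char) (sep : Bool),
    (cs.foldl pvStepA (acc, sep)).1 = acc ++ pvCol sep cs := by
  induction cs with
  | nil => intro acc sep; simp [pvCol]
  | cons c cs ih =>
    intro acc sep
    by_cases h : PySem.Chars.isalnum c
    · simp [pvStepA, h, pvCol, ih]
    · cases sep <;> simp [pvStepA, h, pvCol, ih]

theorem pvCol_run (cs : List Char) :
    pvCol false cs = cs.takeWhile PySem.Chars.isalnum
      ++ pvCol false (cs.dropWhile PySem.Chars.isalnum) := by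
  induction cs with
  | nil => rfl
  | cons c cs ih =>
    by_cases h : PySem.Chars.isalnum c
    · simp [pvCol, h, ih]
    · simp [pvCol, h]

-- the possible trailing '-' of A's collapse output
def pvTail (n : List Char) : List Char :=
  if pvRuns n = [] then []
  else match n.getLast? with
       | some c => if PySem.Chars.isalnum c then [] else ['-']
       | none => []

theorem pvRuns_ne_nil {l : List Char} {x : Char} (hx : x ∈ l)
    (ha : PySem.Chars.isalnum x) : pvRuns l ≠ [] := by
  induction l with
  | nil => cases hx
  | cons c cs ih =>
    by_cases h : PySem.Chars.isalnum c
    · rw [pvRuns]; simp [h]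
    · rw [pvRuns]; simp only [h]
      rcases List.mem_cons.mp hx with rfl | hx
      · exact absurd ha h
      · exact ih hx

theorem pvRuns_all_alnum {l : List Char} {r : List Char} (hr : r ∈ pvRuns l) :
    r ≠ [] ∧ ∀ x ∈ r, PySem.Chars.isalnum x := by
  induction l using pvRuns.induct with
  | case1 => rw [pvRuns] at hr; cases hr
  | case2 c rest h ih =>
    rw [pvRuns] at hr; rw [if_pos h] at hr
    rcases List.mem_cons.mp hr with rfl | hr
    · refine ⟨by simp, ?_⟩
      intro x hx
      rcases List.mem_cons.mp hx with rfl | hx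
      · exact h
      · exact List.mem_takeWhile_imp hx
    · exact ih hr
  | case3 c rest h ih =>
    rw [pvRuns] at hr; rw [if_neg h] at hr
    exact ih hr

-- the first matching run: interaction of intercalate with a cons
theorem pvInter_cons (s a : List Char) {l : List (List Char)} (hl : l ≠ []) :
    List.intercalate s (a :: l) = a ++ s ++ List.intercalate s l := by
  cases l with
  | nil => exact absurd rfl hl
  | cons b l' => simp [List.intercalate, List.intersperse]

theorem pvInter_getLast (rs : List (List Char)) (hrs : rs ≠ [])
    (hall : ∀ r ∈ rs, r ≠ [] ∧ ∀ x ∈ r, PySem.Chars.isalnum x) :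
    ∃ y, (List.intercalate ['-'] rs).getLast? = some y ∧ PySem.Chars.isalnum y := by
  induction rs with
  | nil => exact absurd rfl hrs
  | cons a l ih =>
    cases l with
    | nil =>
      obtain ⟨hne, halnum⟩ := hall a (by simp)
      obtain ⟨y, hy⟩ := List.getLast?_isSome.mpr hne |> Option.isSome_iff_exists.mp
      exact ⟨y, by simpa [List.intercalate] using hy,
             halnum y (List.mem_of_getLast? hy)⟩
    | cons b l' =>
      obtain ⟨y, hy, hyal⟩ := ih (by simp) (fun r hr => hall r (List.mem_cons_of_mem _ hr))
      refine ⟨y, ?_, hyal⟩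
      rw [pvInter_cons _ _ (by simp), List.getLast?_append, List.getLast?_append, hy]
      rfl

theorem pvRuns_nil : pvRuns [] = [] := by rw [pvRuns]

theorem pvAlnum_ne_dash {c : Char} (h : PySem.Chars.isalnum c) : ('-' == c) = false := by
  have hne : c ≠ '-' := by rintro rfl; revert h; decide
  exact beq_eq_false_iff_ne.mpr (Ne.symm hne)

theorem pvCol_true_aux : ∀ (k : Nat) (n : List Char), n.length ≤ k →
    pvCol true n = List.intercalate ['-'] (pvRuns n) ++ pvTail n := by
  intro k
  induction k with
  | zero =>
    intro n hn
    rw [List.length_eq_zero_iff.mp (Nat.le_zero.mp hn)]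
    simp [pvCol, pvRuns_nil, pvTail, List.intercalate]
  | succ k IH =>
    intro n hn
    cases n with
    | nil => simp [pvCol, pvTail, pvRuns_nil, List.intercalate]
    | cons c cs =>
      simp only [List.length_cons, Nat.succ_le_succ_iff] at hn
      by_cases hc : PySem.Chars.isalnum c
      · have hrw : pvRuns (c :: cs) =
            (c :: cs.takeWhile PySem.Chars.isalnum) ::
              pvRuns (cs.dropWhile PySem.Chars.isalnum) := by
          rw [pvRuns]; simp [hc]
        have hcol : pvCol true (c :: cs) =
            c :: (cs.takeWhile PySem.Chars.isalnum
              ++ pvCol false (cs.dropWhile PySem.Chars.isalnum)) := by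
          simp only [pvCol, if_pos hc]
          rw [pvCol_run cs]
        rcases hd : cs.dropWhile PySem.Chars.isalnum with _ | ⟨e, d'⟩
        · -- cs is all alphanumeric: a single run, no trailing dash
          have hall : ∀ x ∈ cs, PySem.Chars.isalnum x := List.dropWhile_eq_nil_iff.mp hd
          have ht : cs.takeWhile PySem.Chars.isalnum = cs := by
            have := List.takeWhile_append_dropWhile
              (p := PySem.Chars.isalnum) (l := cs)
            rwa [hd, List.append_nil] at this
          have htail : pvTail (c :: cs) = [] := by
            obtain ⟨y, hy⟩ := List.getLast?_isSome.mpr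
              (List.cons_ne_nil c cs) |> Option.isSome_iff_exists.mp
            have hyal : PySem.Chars.isalnum y := by
              rcases List.mem_cons.mp (List.mem_of_getLast? hy) with rfl | h
              · exact hc
              · exact hall y h
            simp [pvTail, hrw, hy, hyal]
          rw [hcol, hrw, hd, ht, htail]
          simp [pvCol, pvRuns_nil, List.intercalate]
        · -- cs = t ++ e :: d' with e non-alphanumeric
          have he : PySem.Chars.isalnum e = false := by
            have := List.head_dropWhile_not (p := PySem.Chars.isalnum) (l := cs)
              (w := by rw [hd]; simp)
            simpa [hd] using this
          have hlen : d'.length ≤ k := by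
            have h1 : (cs.dropWhile PySem.Chars.isalnum).length ≤ cs.length :=
              List.length_dropWhile_le _ _
            rw [hd] at h1; simp at h1; omega
          have ihd := IH d' hlen
          have hcold : pvCol false (e :: d') = '-' :: pvCol true d' := by
            simp [pvCol, he]
          have hcs : cs = cs.takeWhile PySem.Chars.isalnum ++ e :: d' := by
            conv_lhs => rw [← List.takeWhile_append_dropWhile
              (p := PySem.Chars.isalnum) (l := cs), hd]
          have hre : pvRuns (e :: d') = pvRuns d' := by
            rw [pvRuns]; simp [he]
          by_cases hr : pvRuns d' = []
          · have hnone : ∀ x ∈ d', ¬ PySem.Chars.isalnum x :=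
              fun x hx ha => pvRuns_ne_nil hx ha hr
            have htail : pvTail (c :: cs) = ['-'] := by
              obtain ⟨y, hy⟩ := List.getLast?_isSome.mpr
                (List.cons_ne_nil e d') |> Option.isSome_iff_exists.mp
              have hyal : PySem.Chars.isalnum y = false := by
                rcases List.mem_cons.mp (List.mem_of_getLast? hy) with rfl | h
                · exact he
                · simpa using hnone y h
              have hlast : (c :: cs).getLast? = some y := by
                rw [hcs, ← List.cons_append, List.getLast?_append, hy]; simp
              simp [pvTail, hrw, hlast, hyal]
            have htaild : pvTail d' = [] := by simp [pvTail, hr]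
            rw [hcol, hrw, hd, hre, hr, hcold, ihd, hr, htail, htaild]
            simp [List.intercalate]
          · have hd'ne : d' ≠ [] := by
              intro h; rw [h] at hr; exact hr pvRuns_nil
            obtain ⟨y, hy⟩ := List.getLast?_isSome.mpr hd'ne
              |> Option.isSome_iff_exists.mp
            have hsplit : c :: cs = ((c :: cs.takeWhile PySem.Chars.isalnum) ++ [e]) ++ d' := by
              conv_lhs => rw [hcs]
              simp
            have hlast : (c :: cs).getLast? = some y := by
              rw [hsplit, List.getLast?_append, hy]; simp
            have htail : pvTail (c :: cs) = pvTail d' := by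
              simp only [pvTail, hrw, hlast, hy]
              simp [hr]
            rw [hcol, hrw, hd, hre, hcold, ihd, htail,
                pvInter_cons _ _ hr]
            simp
      · have hrw : pvRuns (c :: cs) = pvRuns cs := by rw [pvRuns]; simp [hc]
        have htail : pvTail (c :: cs) = pvTail cs := by
          by_cases hr : pvRuns cs = []
          · simp [pvTail, hrw, hr]
          · have hcsne : cs ≠ [] := by
              intro h; rw [h] at hr; exact hr pvRuns_nil
            obtain ⟨b, l', rfl⟩ := List.exists_cons_of_ne_nil hcsne
            simp [pvTail, hrw, List.getLast?_cons_cons]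
        have hcol : pvCol true (c :: cs) = pvCol true cs := by simp [pvCol, hc]
        rw [hcol, hrw, htail]
        exact IH cs hn

theorem pvCol_true_eq (n : List Char) :
    pvCol true n = List.intercalate ['-'] (pvRuns n) ++ pvTail n :=
  pvCol_true_aux n.length n le_rfl

theorem pvStrip_lead (x : List Char) :
    PySem.Chars.stripChars ('-' :: x) ['-'] = PySem.Chars.stripChars x ['-'] := by
  simp [PySem.Chars.stripChars]

theorem pvStrip_trail (x : List Char) :
    PySem.Chars.stripChars (x ++ ['-']) ['-'] = PySem.Chars.stripChars x ['-'] := by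
  simp only [PySem.Chars.stripChars, List.dropWhile_append]
  by_cases h : (List.dropWhile (fun c => ['-'].contains c) x).isEmpty
  · rw [if_pos h, List.isEmpty_iff.mp h]
    simp
  · rw [if_neg h]
    simp [List.reverse_append, List.dropWhile_cons]

theorem pvStrip_id {x : List Char}
    (hhead : ∀ c, x.head? = some c → ('-' == c) = false)
    (hlast : ∀ c, x.getLast? = some c → ('-' == c) = false) :
    PySem.Chars.stripChars x ['-'] = x := by
  have hfront : List.dropWhile (fun c => ['-'].contains c) x = x := by
    cases hx : x with
    | nil => rfl
    | cons a as =>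
      have := hhead a (by rw [hx]; rfl)
      have hne : a ≠ '-' := by intro h; rw [h] at this; simp at this
      simp [List.dropWhile_cons, hne]
  have hback : List.dropWhile (fun c => ['-'].contains c) x.reverse = x.reverse := by
    cases hx : x.reverse with
    | nil => rfl
    | cons a as =>
      have ha : x.getLast? = some a := by
        rw [← List.head?_reverse, hx]; rfl
      have := hlast a ha
      have hne : a ≠ '-' := by intro h; rw [h] at this; simp at this
      simp [hx, List.dropWhile_cons, hne]
  simp only [PySem.Chars.stripChars, hfront, hback, List.reverse_reverse]

theorem pvStrip_inter (n : List Char) :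
    PySem.Chars.stripChars (List.intercalate ['-'] (pvRuns n)) ['-']
      = List.intercalate ['-'] (pvRuns n) := by
  rcases hrs : pvRuns n with _ | ⟨a, l⟩
  · simp [List.intercalate, PySem.Chars.stripChars]
  · have hall : ∀ r ∈ (a :: l), r ≠ [] ∧ ∀ x ∈ r, PySem.Chars.isalnum x := by
      rw [← hrs]; exact fun r hr => pvRuns_all_alnum hr
    apply pvStrip_id
    · intro c hc
      obtain ⟨hane, haal⟩ := hall a (by simp)
      obtain ⟨b, bs, rfl⟩ := List.exists_cons_of_ne_nil hane
      have hcb : b = c := by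
        cases l with
        | nil => simpa [List.intercalate] using hc
        | cons u l' =>
          rw [pvInter_cons _ _ (by simp)] at hc
          simpa using hc
      rw [← hcb]
      exact pvAlnum_ne_dash (haal b (by simp))
    · intro c hc
      obtain ⟨y, hy, hyal⟩ := pvInter_getLast (a :: l) (by simp) hall
      rw [hy] at hc
      exact (Option.some.inj hc) ▸ pvAlnum_ne_dash hyal

theorem pvMain (n : List Char) :
    PySem.Chars.stripChars ((n.foldl pvStepA ([], false)).1) ['-']
      = List.intercalate ['-'] (pvRuns n) := by
  rw [pvFold_eq_col n [] false, List.nil_append]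
  have hft : PySem.Chars.stripChars (pvCol false n) ['-']
      = PySem.Chars.stripChars (pvCol true n) ['-'] := by
    cases n with
    | nil => simp [pvCol, pvTail, pvRuns_nil, List.intercalate]
    | cons c cs =>
      by_cases hc : PySem.Chars.isalnum c
      · simp [pvCol, hc]
      · have h1 : pvCol false (c :: cs) = '-' :: pvCol true cs := by simp [pvCol, hc]
        have h2 : pvCol true (c :: cs) = pvCol true cs := by simp [pvCol, hc]
        rw [h1, h2]
        exact pvStrip_lead _
  rw [hft, pvCol_true_eq n]
  by_cases hr : pvRuns n = []
  · simp [pvTail, hr, List.intercalate, PySem.Chars.stripChars]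
  · rcases hn : n.getLast? with _ | y
    · have : n = [] := by
        cases n with
        | nil => rfl
        | cons a as => simp at hn
      rw [this] at hr; exact absurd pvRuns_nil hr
    · by_cases hy : PySem.Chars.isalnum y
      · have : pvTail n = [] := by simp [pvTail, hr, hn, hy]
        rw [this, List.append_nil]; exact pvStrip_inter n
      · have : pvTail n = ['-'] := by simp [pvTail, hr, hn, hy]
        rw [this, pvStrip_trail]; exact pvStrip_inter n

-- ===== VERDICT (by name: the statement is the Claim_ definition above) =====
theorem slugify_author_spec : Claim_equal_slugify_author := by
  intro name _
  unfold Spec_slugify_author slugify_author slugify_author_alt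
  simp only [pvDropPrefix_eq, pvMain]
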